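-- pv_equiv track=rewrite | github.com/maciej-janusz/asd | egz1_2024/B/egz1b.py | kstrong
-- ===== SOURCE A (Python) =====
-- def kstrong(T, k):
--   n = len(T)
--   memo = [[-1]*(k+1) for _ in range(n)]
--
--   def f(i, s):
--     if i == 0:
--       return max(0, T[i])
--
--     if memo[i][s] != -1:
--       return memo[i][s]
--
--     best = max(0, T[i], f(i-1, s) + T[i])
--     if s > 0:
--       best = max(f(i-1, s-1), best)
--
--     memo[i][s] = best
--     return best
--
--   return max(f(i, k) for i in range(n))
-- ===== SOURCE B (Python) =====
-- def kstrong(T, k):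
--     n = len(T)
--     prev = [max(0, T[0])] * (k + 1)
--     ans = prev[k]
--     for i in range(1, n):
--         cur = []
--         for s in range(k + 1):
--             best = max(0, T[i], prev[s] + T[i])
--             if s > 0:
--                 best = max(prev[s - 1], best)
--             cur.append(best)
--         ans = max(ans, cur[k])
--         prev = cur
--     return ans
-- ===== Notes on version B (the rewrite author's own statement) =====
-- stated objective: alternative
-- what changed: Replaced the memoized top-down recursion f(i,s) with an explicit bottom-up DP over rows (rolling array), scanning i from 1 to n-1 and maintaining the running maximum of dp[i][k].
-- outside the precondition, e.g. on kstrong([5], -1): A returns 5, B raises IndexError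
import Mathlib
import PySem

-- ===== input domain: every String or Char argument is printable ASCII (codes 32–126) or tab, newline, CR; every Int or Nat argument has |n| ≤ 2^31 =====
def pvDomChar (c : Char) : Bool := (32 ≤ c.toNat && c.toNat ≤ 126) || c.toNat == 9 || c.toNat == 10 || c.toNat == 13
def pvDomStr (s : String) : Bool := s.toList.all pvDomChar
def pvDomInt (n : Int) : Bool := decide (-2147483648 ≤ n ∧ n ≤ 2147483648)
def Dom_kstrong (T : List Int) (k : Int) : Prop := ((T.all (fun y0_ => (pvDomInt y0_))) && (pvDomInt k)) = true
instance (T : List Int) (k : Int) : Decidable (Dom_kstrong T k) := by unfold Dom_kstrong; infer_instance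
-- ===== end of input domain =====

-- B replaces A's memoized top-down recursion by an explicit bottom-up rolling-array DP (alternative decomposition, same cost).


-- ===== PORT A =====
-- A's memo table only caches values of the pure recursion f(i,s) (which are ≥ 0, so the -1
-- sentinel never collides); the port is that recursion itself.  Indices i are always in
-- [0, len T), so T[i] is ported exactly by getD i 0.
def kstrongF (T : List Int) : Nat → Nat → Int
  | 0, _ => max 0 (T.getD 0 0)
  | (i+1), s =>
    let ti := T.getD (i+1) 0
    let best := max (max 0 ti) (kstrongF T i s + ti)
    if 0 < s then max (kstrongF T i (s-1)) best else best

-- max(f(i,k) for i in range(n)); Pre_ guarantees the list is nonempty (else Python raises ValueError)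
def kstrong (T : List Int) (k : Int) : Int :=
  (((List.range T.length).map (fun i => kstrongF T i k.toNat)).max?).getD 0

-- ===== PORT B =====
-- B's rows are Python lists (O(1) indexing), ported as Array; cur starts empty and is
-- appended to (push), exactly as Source B's inner loop does
def kstrongRowA (prev : Array Int) (ti : Int) (kk : Nat) : Array Int :=
  (List.range (kk+1)).foldl (fun cur s =>
    let best := max (max 0 ti) (prev.getD s 0 + ti)
    let best2 := if 0 < s then max (prev.getD (s-1) 0) best else best
    cur.push best2) #[]

def kstrong_alt (T : List Int) (k : Int) : Int :=
  let kk := k.toNat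
  let prev0 := Array.replicate (kk+1) (max 0 (T.getD 0 0))
  (((List.range' 1 (T.length - 1)).foldl
    (fun (st : Int × Array Int) i =>
      let cur := kstrongRowA st.2 (T.getD i 0) kk
      (max st.1 (cur.getD kk 0), cur))
    (prev0.getD kk 0, prev0))).1

-- ===== PRECONDITION & SPEC =====
-- Pre_ excludes T = [] (A raises ValueError on max of an empty generator) and k < 0
-- (A raises IndexError for len T ≥ 2; for len T = 1 A accidentally returns max(0,T[0])
-- without ever consulting k, while B's own row construction raises IndexError there).
def Pre_kstrong (T : List Int) (k : Int) : Prop := T ≠ [] ∧ 0 ≤ k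
instance (T : List Int) (k : Int) : Decidable (Pre_kstrong T k) := by unfold Pre_kstrong; infer_instance
def pvWitness_kstrong : List Int × Int := ([1, -2, 3], 1)
def Spec_kstrong (T : List Int) (k : Int) (out : Int) : Prop := out = kstrong_alt T k
instance (T : List Int) (k : Int) (out : Int) : Decidable (Spec_kstrong T k out) := by unfold Spec_kstrong; infer_instance

-- ===== CLAIM (what is proved, stated in full; the proofs are below) =====
def Claim_equal_kstrong : Prop := ∀ (T : List Int) (k : Int), Dom_kstrong T k → Pre_kstrong T k → Spec_kstrong T k (kstrong T k)

-- ===== LEMMAS AND PROOFS =====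

-- list-level view of one DP row
def kstrongRow (prev : List Int) (ti : Int) (kk : Nat) : List Int :=
  (List.range (kk+1)).map (fun s =>
    let best := max (max 0 ti) (prev.getD s 0 + ti)
    if 0 < s then max (prev.getD (s-1) 0) best else best)

-- the ideal row i of the DP table: dp[i][s] = f(i,s)
def kstrongR (T : List Int) (kk : Nat) (i : Nat) : List Int :=
  (List.range (kk+1)).map (fun s => kstrongF T i s)

theorem kstrong_arr_eq {a b : Array Int} (h : a.toList = b.toList) : a = b := by
  cases a; cases b; simpa using h

theorem kstrong_getD_toArray (l : List Int) (i : Nat) : (l.toArray).getD i 0 = l.getD i 0 := by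
  simp [Array.getD, List.getD]
  split_ifs with h
  · simp [List.getElem?_eq_getElem h]
  · simp [List.getElem?_eq_none (by omega : l.length ≤ i)]

theorem kstrong_getD_eq (a : Array Int) (i : Nat) : a.getD i 0 = a.toList.getD i 0 := by
  rw [← kstrong_getD_toArray a.toList, Array.toArray_toList]

theorem kstrong_foldl_push (l : List Nat) (f : Nat → Int) (acc : Array Int) :
    (l.foldl (fun a s => a.push (f s)) acc).toList = acc.toList ++ l.map f := by
  induction l generalizing acc with
  | nil => simp
  | cons x xs ih => simp only [List.foldl_cons, List.map_cons]; rw [ih]; simp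

theorem kstrongRowA_toList (prev : Array Int) (ti : Int) (kk : Nat) :
    (kstrongRowA prev ti kk).toList = kstrongRow prev.toList ti kk := by
  unfold kstrongRowA kstrongRow
  rw [kstrong_foldl_push]
  simp only [List.nil_append, kstrong_getD_eq]

theorem kstrong_range_split (m : Nat) (h : 1 ≤ m) :
    List.range m = 0 :: List.range' 1 (m - 1) := by
  obtain ⟨m', rfl⟩ : ∃ m', m = m' + 1 := ⟨m - 1, by omega⟩
  simp [List.range_eq_range', List.range'_succ]

theorem kstrongR_getD (T : List Int) (kk i s : Nat) (hs : s < kk + 1) :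
    (kstrongR T kk i).getD s 0 = kstrongF T i s := by
  simp [kstrongR, List.getD, hs]

theorem kstrongRow_step (T : List Int) (kk i : Nat) :
    kstrongRow (kstrongR T kk i) (T.getD (i+1) 0) kk = kstrongR T kk (i+1) := by
  unfold kstrongRow
  conv_rhs => rw [kstrongR]
  refine List.map_congr_left (fun s hs => ?_)
  have hs' : s < kk + 1 := List.mem_range.mp hs
  by_cases h0 : 0 < s
  · have hs1 : s - 1 < kk + 1 := by omega
    simp only [kstrongF, h0, if_true]
    rw [kstrongR_getD T kk i s hs', kstrongR_getD T kk i (s-1) hs1]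
  · simp only [kstrongF, h0, if_false]
    rw [kstrongR_getD T kk i s hs']

theorem kstrongRowA_step (T : List Int) (kk i : Nat) :
    kstrongRowA (kstrongR T kk i).toArray (T.getD (i+1) 0) kk = (kstrongR T kk (i+1)).toArray := by
  refine kstrong_arr_eq ?_
  rw [kstrongRowA_toList, List.toList_toArray, List.toList_toArray, kstrongRow_step]

theorem kstrongR_zero (T : List Int) (kk : Nat) :
    kstrongR T kk 0 = List.replicate (kk+1) (max 0 (T.getD 0 0)) := by
  simp [kstrongR, kstrongF]

theorem kstrong_loop (T : List Int) (kk : Nat) (m : Nat) :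
    (List.range' 1 m).foldl
      (fun (st : Int × Array Int) i =>
        let cur := kstrongRowA st.2 (T.getD i 0) kk
        (max st.1 (cur.getD kk 0), cur))
      (kstrongF T 0 kk, (kstrongR T kk 0).toArray)
    = (((List.range' 1 m).map (fun i => kstrongF T i kk)).foldl max (kstrongF T 0 kk),
       (kstrongR T kk m).toArray) := by
  induction m with
  | zero => simp
  | succ m ih =>
    have h1 : (1 : Nat) + 1 * m = m + 1 := by omega
    rw [List.range'_concat, h1, List.foldl_append, ih, List.map_append, List.foldl_append]
    simp only [List.foldl_cons, List.foldl_nil, List.map_cons, List.map_nil]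
    rw [kstrongRowA_step T kk m]
    rw [kstrong_getD_toArray, kstrongR_getD T kk (m+1) kk (by omega)]

theorem kstrong_spec' (T : List Int) (k : Int) (hT : T ≠ []) :
    kstrong T k = kstrong_alt T k := by
  have hn1 : 1 ≤ T.length := List.length_pos_iff.mpr hT
  have hB : kstrong_alt T k =
      (((List.range' 1 (T.length - 1)).map (fun i => kstrongF T i k.toNat)).foldl max
        (kstrongF T 0 k.toNat)) := by
    unfold kstrong_alt
    dsimp only
    have hrep : Array.replicate (k.toNat+1) (max 0 (T.getD 0 0)) = (kstrongR T k.toNat 0).toArray := by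
      refine kstrong_arr_eq ?_
      rw [Array.toList_replicate, List.toList_toArray, kstrongR_zero]
    rw [hrep, kstrong_getD_toArray, kstrongR_getD T k.toNat 0 k.toNat (by omega)]
    rw [kstrong_loop T k.toNat (T.length - 1)]
  rw [hB]
  unfold kstrong
  rw [kstrong_range_split T.length hn1]
  simp [List.max?]

-- ===== VERDICT (by name: the statement is the Claim_ definition above) =====
theorem kstrong_spec : Claim_equal_kstrong := by
  intro T k _ hPre
  unfold Spec_kstrong
  exact kstrong_spec' T k hPre.1
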